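-- pv_equiv track=rewrite | github.com/tmonj1/papycli | src/papycli/completion.py | _zsh_method_resource_cases
-- ===== SOURCE A (Python) =====
-- from typing import Any
--
-- def _shell_single_quote(s: str) -> str:
--     """任意の文字列をシェルの単一クォートリテラルに変換する。
--
--     単一クォート内では変数展開やコマンド置換が行われないため、
--     スペース・$()・バッククォート等が含まれていても安全なリテラルとして使用できる。
--     文字列中の単一クォートは '\"'\"' の形で閉じて再度開くことで表現する。
--     """
--     return "'" + s.replace("'", "'\"'\"'") + "'"
--
-- def _zsh_array_elems(items: list[str]) -> str:
--     """zsh 配列リテラルの要素部分（括弧なし）を返す。"""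
--     return " ".join(_shell_single_quote(w) for w in items)
--
-- def _zsh_method_resource_cases(apidef: dict[str, Any]) -> str:
--     lines: list[str] = []
--     for method in ("get", "post", "put", "patch", "delete"):
--         resources = sorted(
--             p for p, ops in apidef.items() if any(o["method"] == method for o in ops)
--         )
--         if resources:
--             ae = _zsh_array_elems(resources)
--             lines.append(f"            {method}) _c=({ae}); _describe 'resource' _c ;;")
--     lines.append("            *) ;;")
--     return "\n".join(lines)
-- ===== SOURCE B (Python) =====
-- def _shell_single_quote(s: str) -> str:
--     return "'" + s.replace("'", "'\"'\"'") + "'"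
--
-- def _zsh_array_elems(items: list[str]) -> str:
--     return " ".join(_shell_single_quote(w) for w in items)
--
-- def _zsh_method_resource_cases(apidef: dict[str, "Any"]) -> str:
--     # One pass over apidef: bucket paths under each method they support,
--     # then emit the case lines in the fixed method order.
--     buckets: dict[str, list[str]] = {}
--     for path, ops in apidef.items():
--         for m in dict.fromkeys(o["method"] for o in ops):
--             buckets.setdefault(m, []).append(path)
--     lines: list[str] = []
--     for method in ("get", "post", "put", "patch", "delete"):
--         rs = buckets.get(method, [])
--         if rs:
--             ae = _zsh_array_elems(sorted(rs))
--             lines.append(f"            {method}) _c=({ae}); _describe 'resource' _c ;;")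
--     lines.append("            *) ;;")
--     return "\n".join(lines)
-- ===== Notes on version B (the rewrite author's own statement) =====
-- stated objective: alternative
-- what changed: Instead of rescanning all of apidef (with an inner any() over ops) once per HTTP method, B makes a single pass over apidef grouping paths into per-method buckets (deduplicating methods per entry), then emits the case lines from the buckets in the fixed method order.
import Mathlib
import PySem

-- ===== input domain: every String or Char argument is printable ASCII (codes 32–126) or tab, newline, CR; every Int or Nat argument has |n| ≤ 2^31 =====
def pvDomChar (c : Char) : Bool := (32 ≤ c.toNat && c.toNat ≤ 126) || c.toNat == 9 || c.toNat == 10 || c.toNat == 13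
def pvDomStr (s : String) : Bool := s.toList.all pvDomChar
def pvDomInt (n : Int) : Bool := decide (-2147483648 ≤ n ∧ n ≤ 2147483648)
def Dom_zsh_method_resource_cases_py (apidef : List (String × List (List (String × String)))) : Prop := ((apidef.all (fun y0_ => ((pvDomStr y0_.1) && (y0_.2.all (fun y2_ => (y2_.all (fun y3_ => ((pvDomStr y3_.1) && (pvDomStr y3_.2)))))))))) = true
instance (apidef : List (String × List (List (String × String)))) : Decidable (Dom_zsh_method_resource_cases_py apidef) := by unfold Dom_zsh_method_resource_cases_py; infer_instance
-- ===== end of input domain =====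

-- B replaces A's per-method rescans of apidef with a single bucketing pass; equal output proved on Pre_ (every op carries a "method" key).


-- ===== PORT A =====
-- shared module helpers (_shell_single_quote, _zsh_array_elems), used verbatim by both Pythons
def pvShellSingleQuote (s : String) : String := "'" ++ PySem.Str.replace s "'" "'\"'\"'" ++ "'"
def pvZshArrayElems (items : List String) : String := PySem.Str.join " " (items.map pvShellSingleQuote)
-- o["method"]; total via default "" — Pre_ excludes the inputs where Python raises KeyError
def pvMeth (o : List (String × String)) : String := (PySem.Dict.getD (PySem.Dict.mk o) "method" "")

def zsh_method_resource_cases_py (apidef : List (String × List (List (String × String)))) : String :=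
  let lines : List String :=
    ["get", "post", "put", "patch", "delete"].foldl (fun lines method =>
      let resources := PySem.List.sorted
        (apidef.filterMap (fun pr => if pr.2.any (fun o => pvMeth o == method) then some pr.1 else none))
        (fun x => x) false
      if resources ≠ [] then
        lines ++ ["            " ++ method ++ ") _c=(" ++ pvZshArrayElems resources ++ "); _describe 'resource' _c ;;"]
      else lines) []
  PySem.Str.join "\n" (lines ++ ["            *) ;;"])

-- ===== PORT B =====
def zsh_method_resource_cases_py_alt (apidef : List (String × List (List (String × String)))) : String :=
  let buckets : PySem.Dict String (List String) :=
    apidef.foldl (fun b pr =>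
      (PySem.List.dedup (pr.2.map pvMeth)).foldl (fun b m => b.modify m [] (· ++ [pr.1])) b)
      PySem.Dict.empty
  let lines : List String :=
    ["get", "post", "put", "patch", "delete"].foldl (fun lines method =>
      let rs := buckets.getD method []
      if rs ≠ [] then
        lines ++ ["            " ++ method ++ ") _c=(" ++ pvZshArrayElems (PySem.List.sorted rs (fun x => x) false) ++ "); _describe 'resource' _c ;;"]
      else lines) []
  PySem.Str.join "\n" (lines ++ ["            *) ;;"])

-- ===== PRECONDITION & SPEC =====
-- Pre_ excludes inputs where some op dict lacks the key "method": there Python A raises KeyError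
-- (except in the accidental corner where every method finds a match before the defective op — A's
-- short-circuiting any() makes that value an artefact, and B raises KeyError there).
def Pre_zsh_method_resource_cases_py (apidef : List (String × List (List (String × String)))) : Prop :=
  ∀ pr ∈ apidef, ∀ o ∈ pr.2, (PySem.Dict.contains (PySem.Dict.mk o) "method") = true
instance (apidef : List (String × List (List (String × String)))) : Decidable (Pre_zsh_method_resource_cases_py apidef) := by unfold Pre_zsh_method_resource_cases_py; infer_instance
def pvWitness_zsh_method_resource_cases_py : (List (String × List (List (String × String)))) :=
  [("pets", [[("method", "get")], [("method", "post")]]), ("toys", [])]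
def Spec_zsh_method_resource_cases_py (apidef : List (String × List (List (String × String)))) (out : String) : Prop := out = zsh_method_resource_cases_py_alt apidef
instance (apidef : List (String × List (List (String × String)))) (out : String) : Decidable (Spec_zsh_method_resource_cases_py apidef out) := by unfold Spec_zsh_method_resource_cases_py; infer_instance

-- ===== CLAIM (what is proved, stated in full; the proofs are below) =====
def Claim_equal_zsh_method_resource_cases_py : Prop := ∀ (apidef : List (String × List (List (String × String)))), Dom_zsh_method_resource_cases_py apidef → Pre_zsh_method_resource_cases_py apidef → Spec_zsh_method_resource_cases_py apidef (zsh_method_resource_cases_py apidef)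

-- ===== LEMMAS AND PROOFS =====

lemma filter_beq_of_nodup {α : Type} [DecidableEq α] (l : List α) (c : α) (h : l.Nodup) :
    l.filter (fun x => x == c) = if c ∈ l then [c] else [] := by
  induction l with
  | nil => simp
  | cons a t ih =>
    simp only [List.nodup_cons] at h
    by_cases hac : a = c
    · subst hac
      simp [h.1, ih h.2]
    · simp [hac, ih h.2, Ne.symm hac]

lemma bucket_getD (apidef : List (String × List (List (String × String)))) (c : String)
    (b : PySem.Dict String (List String)) :
    (apidef.foldl (fun b pr =>
        (PySem.List.dedup (pr.2.map pvMeth)).foldl (fun b m => b.modify m [] (· ++ [pr.1])) b) b).getD c []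
      = b.getD c [] ++ apidef.filterMap (fun pr => if pr.2.any (fun o => pvMeth o == c) then some pr.1 else none) := by
  induction apidef generalizing b with
  | nil => simp
  | cons pr t ih =>
    simp only [List.foldl_cons, ih, List.filterMap_cons]
    have hinner : ((PySem.List.dedup (pr.2.map pvMeth)).foldl (fun b m => b.modify m [] (· ++ [pr.1])) b).getD c []
        = b.getD c [] ++ (if pr.2.any (fun o => pvMeth o == c) then [pr.1] else []) := by
      have hmapfold : (PySem.List.dedup (pr.2.map pvMeth)).foldl (fun b m => b.modify m [] (· ++ [pr.1])) b
          = ((PySem.List.dedup (pr.2.map pvMeth)).map (fun m => (m, pr.1))).foldl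
              (fun d p => d.modify p.1 [] (· ++ [p.2])) b := by
        rw [List.foldl_map]
      rw [hmapfold, PySem.Dict.getD_foldl_modify_append, List.filter_map]
      simp only [Function.comp_def]
      rw [filter_beq_of_nodup _ c (PySem.List.nodup_dedup _)]
      by_cases hc : c ∈ PySem.List.dedup (pr.2.map pvMeth)
      · have : pr.2.any (fun o => pvMeth o == c) = true := by
          rw [PySem.List.mem_dedup] at hc
          simp only [List.mem_map] at hc
          obtain ⟨o, ho, rfl⟩ := hc
          simp only [List.any_eq_true]
          exact ⟨o, ho, by simp⟩
        have hex : ∃ a ∈ pr.2, pvMeth a = c := by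
          simpa [List.any_eq_true] using this
        simp [this, hex]
      · have : pr.2.any (fun o => pvMeth o == c) = false := by
          rw [PySem.List.mem_dedup] at hc
          simp only [List.any_eq_false]
          intro o ho
          simp only [beq_iff_eq]
          intro hEq
          exact hc (List.mem_map.mpr ⟨o, ho, hEq⟩)
        have hall : ∀ x ∈ pr.2, ¬ pvMeth x = c := by
          simpa [List.any_eq_false] using this
        simp [this]
        exact hall
    rw [hinner]
    by_cases hc : pr.2.any (fun o => pvMeth o == c) = true <;>
      simp [hc, List.append_assoc]

-- ===== VERDICT (by name: the statement is the Claim_ definition above) =====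
theorem zsh_method_resource_cases_py_spec : Claim_equal_zsh_method_resource_cases_py := by
  intro apidef _ _
  unfold Spec_zsh_method_resource_cases_py zsh_method_resource_cases_py zsh_method_resource_cases_py_alt
  simp only [List.foldl_cons, List.foldl_nil, bucket_getD, PySem.Dict.getD_empty,
    List.nil_append, ne_eq, PySem.List.sorted_eq_nil_iff]
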